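-- pv_equiv track=rewrite | github.com/raikoug/AdventOfCode | 2024/solutions/python/day_25.py | eval_lock
-- ===== SOURCE A (Python) =====
-- from typing import List, Optional, Tuple
--
-- def eval_lock(lines: List[str]) -> List[int]:
--     """
--     ##### 0
--     .#### 1
--     .#### 2
--     .#### 3
--     .#.#. 4
--     .#... 5
--     ..... 6
--     """
--     h = len(lines)
--     l = len(lines[0])
--     res : List[int] = [0] * l
--     for row,line in enumerate(lines):
--         for col,char in enumerate(line):
--             if char == "#":
--                 res[col] = max(res[col], row)
--
--     return res
-- ===== SOURCE B (Python) =====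
-- from typing import List
--
--
-- def eval_lock(lines: List[str]) -> List[int]:
--     h = len(lines)
--     l = len(lines[0])
--     res: List[int] = [0] * l
--     for col in range(l):
--         for row in range(h - 1, -1, -1):
--             line = lines[row]
--             if col < len(line) and line[col] == "#":
--                 res[col] = row
--                 break
--     return res
-- ===== Notes on version B (the rewrite author's own statement) =====
-- stated objective: alternative
-- what changed: B replaces A's row-major full pass with a running max per column by a column-major bottom-up scan that early-exits at the first '#' found in each column.
import Mathlib
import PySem

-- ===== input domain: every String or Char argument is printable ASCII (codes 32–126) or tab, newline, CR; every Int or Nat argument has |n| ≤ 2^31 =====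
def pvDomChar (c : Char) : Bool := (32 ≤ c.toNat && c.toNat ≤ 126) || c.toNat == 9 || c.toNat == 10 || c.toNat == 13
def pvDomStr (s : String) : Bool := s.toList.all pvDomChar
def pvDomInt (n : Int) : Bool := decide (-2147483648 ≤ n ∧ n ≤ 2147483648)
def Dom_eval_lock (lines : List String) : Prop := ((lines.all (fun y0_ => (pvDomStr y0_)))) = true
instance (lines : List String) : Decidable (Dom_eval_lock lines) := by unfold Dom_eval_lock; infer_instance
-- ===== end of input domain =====

-- B = column-major bottom-up search with early exit instead of A's row-major running-max pass (objective: alternative).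

-- ===== PORT A =====
-- lines[0] is ported via headI; Pre_eval_lock excludes the empty list, where Python A raises IndexError.
def eval_lock (lines : List String) : List Int :=
  let l : Nat := lines.headI.toList.length
  (PySem.List.enumerate lines 0).foldl
    (fun res rl =>
      (PySem.List.enumerate rl.2.toList 0).foldl
        (fun res cc =>
          if cc.2 = '#' then
            PySem.List.pySetD res cc.1 (max (PySem.List.pyGetD res cc.1 0) rl.1)
          else res)
        res)
    (List.replicate l 0)

-- ===== PORT B =====
-- `col < len(line) and line[col] == "#"` from Source B
def pvHitB (cs : List Char) (col : Nat) : Bool :=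
  decide (col < cs.length) && (cs.getD col ' ' == '#')

-- the inner `for row in range(h-1, -1, -1): … break` loop of Source B, scanning rows n-1 … 0;
-- res[col] stays 0 when no row hits
def pvFindHit (lines : List String) (col : Nat) : Nat → Int
  | 0 => 0
  | n + 1 =>
    if pvHitB (lines.getD n "").toList col then (n : Int)
    else pvFindHit lines col n

def eval_lock_alt (lines : List String) : List Int :=
  let h : Nat := lines.length
  let l : Nat := lines.headI.toList.length
  (List.range l).map (fun col => pvFindHit lines col h)

-- ===== PRECONDITION & SPEC =====
-- Pre_ is exactly the set of inputs on which Python A returns: A raises IndexError on the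
-- empty list (lines[0]) and whenever some line has '#' at a column ≥ len(lines[0]) (res[col]).
def Pre_eval_lock (lines : List String) : Prop :=
  lines ≠ [] ∧
    ∀ line ∈ lines, ∀ j < line.toList.length,
      line.toList.getD j ' ' = '#' → j < lines.headI.toList.length
instance (lines : List String) : Decidable (Pre_eval_lock lines) := by
  unfold Pre_eval_lock; infer_instance

def pvWitness_eval_lock : List String := ["##.", ".#", "#"]

def Spec_eval_lock (lines : List String) (out : List Int) : Prop := out = eval_lock_alt lines
instance (lines : List String) (out : List Int) : Decidable (Spec_eval_lock lines out) := by
  unfold Spec_eval_lock; infer_instance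

-- ===== CLAIM (what is proved, stated in full; the proofs are below) =====
def Claim_equal_eval_lock : Prop :=
  ∀ (lines : List String), Dom_eval_lock lines → Pre_eval_lock lines →
    Spec_eval_lock lines (eval_lock lines)

-- ===== LEMMAS AND PROOFS =====

-- the value res[col] holds after the rows `rows` (rows numbered base, base+1, …) have been
-- folded over, starting from acc
def pvColVal (rows : List String) (base : Nat) (col : Nat) (acc : Int) : Int :=
  match rows with
  | [] => acc
  | line :: rest =>
      pvColVal rest (base + 1) col (if pvHitB line.toList col then max acc (base : Int) else acc)

theorem pvInner (row : Int) (cs : List Char) : ∀ (k : Nat) (res : List Int),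
    let out := (PySem.List.enumerate cs (k : Int)).foldl
      (fun res cc =>
        if cc.2 = '#' then
          PySem.List.pySetD res cc.1 (max (PySem.List.pyGetD res cc.1 0) row)
        else res) res
    out.length = res.length ∧
      ∀ (c : Nat) (d : Int),
        out.getD c d =
          if k ≤ c ∧ cs.getD (c - k) ' ' = '#' ∧ c - k < cs.length ∧ c < res.length then
            max (res.getD c d) row
          else res.getD c d := by
  induction cs with
  | nil =>
    intro k res
    simp [PySem.List.enumerate_nil]
  | cons ch rest ih =>
    intro k res
    have hcons : PySem.List.enumerate (ch :: rest) (k : Int)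
        = ((k : Int), ch) :: PySem.List.enumerate rest ((k + 1 : Nat) : Int) := by
      rw [PySem.List.enumerate_cons]; push_cast; ring_nf
    rw [hcons]
    simp only [List.foldl_cons]
    set res₁ : List Int :=
      (if ch = '#' then
        PySem.List.pySetD res ((k : Int)) (max (PySem.List.pyGetD res ((k : Int)) 0) row)
      else res) with hres₁
    have hlen₁ : res₁.length = res.length := by
      rw [hres₁]; split <;> simp [PySem.List.pySetD_natCast]
    have hget₁ : ∀ (c : Nat) (d : Int),
        res₁.getD c d =
          if c = k ∧ ch = '#' ∧ c < res.length then max (res.getD c d) row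
          else res.getD c d := by
      intro c d
      rw [hres₁]
      by_cases hch : ch = '#'
      · rw [if_pos hch, PySem.List.pySetD_natCast, PySem.List.pyGetD_natCast]
        by_cases hck : c = k
        · subst hck
          by_cases hlt : c < res.length
          · rw [if_pos ⟨rfl, hch, hlt⟩]
            have h1 : (res.set c (max (res.getD c 0) row)).getD c d
                = max (res.getD c 0) row := by
              rw [List.getD_eq_getElem?_getD, List.getElem?_set, if_pos rfl, if_pos hlt]
              rfl
            have h2 : res.getD c 0 = res.getD c d := by
              rw [List.getD_eq_getElem _ _ hlt, List.getD_eq_getElem _ _ hlt]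
            rw [h1, h2]
          · rw [if_neg (by tauto)]
            have hset : res.set c (max (res.getD c 0) row) = res :=
              List.set_eq_of_length_le (by omega)
            rw [hset]
        · have hskip : (res.set k (max (res.getD k 0) row)).getD c d = res.getD c d := by
            rw [List.getD_eq_getElem?_getD, List.getElem?_set,
              if_neg (fun h => hck h.symm), ← List.getD_eq_getElem?_getD]
          rw [hskip, if_neg (by tauto)]
      · simp [hch]
    obtain ⟨ihlen, ihget⟩ := ih (k + 1) res₁
    refine ⟨by rw [ihlen, hlen₁], ?_⟩
    intro c d
    rw [ihget c d]
    rw [hlen₁]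
    by_cases hck : c = k
    · have h1 : ¬ (k + 1 ≤ c) := by omega
      rw [if_neg (by tauto), hget₁ c d]
      have hsub : c - k = 0 := by omega
      rw [hsub]
      simp only [List.getD_cons_zero, List.length_cons]
      by_cases hch : ch = '#' <;> by_cases hlt : c < res.length
      · rw [if_pos ⟨hck, hch, hlt⟩, if_pos ⟨le_of_eq hck.symm, hch, by omega, hlt⟩]
      · rw [if_neg (by tauto), if_neg (by tauto)]
      · rw [if_neg (by tauto), if_neg (by tauto)]
      · rw [if_neg (by tauto), if_neg (by tauto)]
    · by_cases hkc : k ≤ c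
      · have hk1c : k + 1 ≤ c := by omega
        have hsub : c - k = (c - (k + 1)) + 1 := by omega
        have hg1 : res₁.getD c d = res.getD c d := by
          rw [hget₁]; simp [hck]
        rw [hg1, hsub]
        simp only [List.getD_cons_succ, List.length_cons]
        by_cases hh : rest.getD (c - (k+1)) ' ' = '#' ∧ c - (k+1) < rest.length ∧ c < res.length
        · rw [if_pos ⟨hk1c, hh.1, hh.2.1, hh.2.2⟩, if_pos ⟨hkc, hh.1, by omega, hh.2.2⟩]
        · rw [if_neg (by tauto), if_neg (by intro h; exact hh ⟨h.2.1, by omega, h.2.2.2⟩)]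
      · have h1 : ¬ (k + 1 ≤ c) := by omega
        rw [if_neg (by tauto), if_neg (by tauto), hget₁]
        simp [hck]

theorem pvOuter (rows : List String) : ∀ (base : Nat) (res : List Int),
    let out := (PySem.List.enumerate rows (base : Int)).foldl
      (fun res rl =>
        (PySem.List.enumerate rl.2.toList 0).foldl
          (fun res cc =>
            if cc.2 = '#' then
              PySem.List.pySetD res cc.1 (max (PySem.List.pyGetD res cc.1 0) rl.1)
            else res) res) res
    out.length = res.length ∧
      ∀ (c : Nat) (d : Int), c < res.length →
        out.getD c d = pvColVal rows base c (res.getD c d) := by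
  induction rows with
  | nil => intro base res; simp [PySem.List.enumerate_nil, pvColVal]
  | cons line rest ih =>
    intro base res
    have hcons : PySem.List.enumerate (line :: rest) (base : Int)
        = ((base : Int), line) :: PySem.List.enumerate rest ((base + 1 : Nat) : Int) := by
      rw [PySem.List.enumerate_cons]; push_cast; ring_nf
    rw [hcons]
    simp only [List.foldl_cons]
    obtain ⟨hlen₁, hget₁⟩ := pvInner ((base : Int)) line.toList 0 res
    simp only [Nat.cast_zero, Nat.sub_zero, Nat.zero_le, true_and] at hlen₁ hget₁
    set res₁ := (PySem.List.enumerate line.toList (0 : Int)).foldl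
      (fun res cc =>
        if cc.2 = '#' then
          PySem.List.pySetD res cc.1 (max (PySem.List.pyGetD res cc.1 0) ((base : Int)))
        else res) res with hres₁
    obtain ⟨ihlen, ihget⟩ := ih (base + 1) res₁
    refine ⟨by rw [ihlen, hlen₁], ?_⟩
    intro c d hc
    rw [ihget c d (by rw [hlen₁]; exact hc)]
    have hv : res₁.getD c d =
        if pvHitB line.toList c then max (res.getD c d) ((base : Int)) else res.getD c d := by
      rw [hget₁ c d]
      have hiff : (line.toList.getD c ' ' = '#' ∧ c < line.toList.length ∧ c < res.length)
          ↔ (pvHitB line.toList c = true) := by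
        constructor
        · rintro ⟨h1, h2, _⟩
          unfold pvHitB
          simp only [Bool.and_eq_true, decide_eq_true_eq, beq_iff_eq]
          exact ⟨h2, h1⟩
        · intro hp
          unfold pvHitB at hp
          simp only [Bool.and_eq_true, decide_eq_true_eq, beq_iff_eq] at hp
          exact ⟨hp.2, hp.1, hc⟩
      by_cases hp : pvHitB line.toList c
      · rw [if_pos (hiff.mpr hp), if_pos hp]
      · rw [if_neg (fun h => hp (hiff.mp h)), if_neg hp]
    rw [pvColVal, hv]

theorem pvColVal_append (xs ys : List String) : ∀ (base col : Nat) (acc : Int),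
    pvColVal (xs ++ ys) base col acc = pvColVal ys (base + xs.length) col (pvColVal xs base col acc) := by
  induction xs with
  | nil => intro base col acc; simp [pvColVal]
  | cons x rest ih =>
    intro base col acc
    simp only [List.cons_append, pvColVal, ih, List.length_cons]
    ring_nf

theorem pvColVal_le (col : Nat) (m : Int) : ∀ (xs : List String) (base : Nat) (acc : Int),
    acc ≤ m → (base : Int) + xs.length ≤ m + 1 → pvColVal xs base col acc ≤ m := by
  intro xs
  induction xs with
  | nil => intro base acc h _; simpa [pvColVal] using h
  | cons x rest ih =>
    intro base acc h hb
    simp only [List.length_cons] at hb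
    have hbase : (base : Int) ≤ m := by push_cast at hb ⊢; omega
    refine ih (base + 1) _ ?_ (by push_cast at hb ⊢; omega)
    split
    · exact max_le h hbase
    · exact h

theorem pvFindHit_eq (lines : List String) (col : Nat) : ∀ (n : Nat), n ≤ lines.length →
    pvFindHit lines col n = pvColVal (lines.take n) 0 col 0 := by
  intro n
  induction n with
  | zero => intro _; simp [pvFindHit, pvColVal]
  | succ n ih =>
    intro hn
    have hnlt : n < lines.length := by omega
    have htake : lines.take (n + 1) = lines.take n ++ [lines[n]] := by
      rw [List.take_add_one]; simp [List.getElem?_eq_getElem hnlt]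
    have hgd : lines.getD n "" = lines[n] := by
      simp [List.getD_eq_getElem?_getD, List.getElem?_eq_getElem hnlt]
    rw [pvFindHit, hgd, htake, pvColVal_append]
    have hlentake : (lines.take n).length = n := by simp [Nat.min_eq_left (le_of_lt hnlt)]
    rw [hlentake, ih (by omega)]
    simp only [pvColVal]
    have hle : pvColVal (lines.take n) 0 col 0 ≤ (n : Int) := by
      refine pvColVal_le col (n : Int) (lines.take n) 0 0 (by positivity) ?_
      rw [hlentake]; push_cast; omega
    split
    · rw [Nat.zero_add]; exact (max_eq_right hle).symm
    · rfl

theorem pv_eq (lines : List String) : eval_lock lines = eval_lock_alt lines := by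
  have h0 : ((0 : Nat) : Int) = (0 : Int) := rfl
  obtain ⟨hlen, hget⟩ := pvOuter lines 0 (List.replicate lines.headI.toList.length 0)
  rw [h0] at hlen hget
  show (PySem.List.enumerate lines (0 : Int)).foldl
      (fun res rl =>
        (PySem.List.enumerate rl.2.toList 0).foldl
          (fun res cc =>
            if cc.2 = '#' then
              PySem.List.pySetD res cc.1 (max (PySem.List.pyGetD res cc.1 0) rl.1)
            else res) res)
      (List.replicate lines.headI.toList.length 0)
    = (List.range lines.headI.toList.length).map (fun col => pvFindHit lines col lines.length)
  apply List.ext_getElem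
  · rw [hlen]; simp
  · intro i h1 h2
    have hil : i < lines.headI.toList.length := by simpa using h2
    rw [← List.getD_eq_getElem _ (0 : Int) h1, hget i 0 (by simpa using hil),
      List.getElem_map, List.getElem_range,
      pvFindHit_eq lines i lines.length (le_refl _), List.take_length]
    rw [List.getD_eq_getElem?_getD, List.getElem?_replicate, if_pos hil]
    rfl

-- ===== VERDICT (by name: the statement is the Claim_ definition above) =====
theorem eval_lock_spec : Claim_equal_eval_lock := by
  intro lines _ _
  unfold Spec_eval_lock
  exact pv_eq lines
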